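-- pv_equiv track=rewrite | github.com/Fmijsters/Advent_of_Code | day16/packetdecoder2.py | decode_literal_value
-- ===== SOURCE A (Python) =====
-- def decode_literal_value(input_binary):
-- 	literal_value=""
-- 	index=0
-- 	part = input_binary[:5]
-- 	while True:
-- 		literal_value+=part[1:]
-- 		index+=5
-- 		if part[0] == '0':
-- 			break
-- 		part = input_binary[index:index+5]
-- 	return literal_value
-- ===== SOURCE B (Python) =====
-- def decode_literal_value(input_binary):
-- 	# Recursive-descent parser: consume one 5-bit group, recurse on the rest.
-- 	part = input_binary[:5]
-- 	if part[0] == '0':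
-- 		return part[1:]
-- 	return part[1:] + decode_literal_value(input_binary[5:])
-- ===== Notes on version B (the rewrite author's own statement) =====
-- stated objective: alternative
-- what changed: A is an iterative index-tracking while-loop with a string accumulator and break; B is a recursive-descent parser with no index, accumulator or loop: it consumes one 5-bit group and recurses on the 5-char suffix, concatenating payloads on the way out.
import Mathlib
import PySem

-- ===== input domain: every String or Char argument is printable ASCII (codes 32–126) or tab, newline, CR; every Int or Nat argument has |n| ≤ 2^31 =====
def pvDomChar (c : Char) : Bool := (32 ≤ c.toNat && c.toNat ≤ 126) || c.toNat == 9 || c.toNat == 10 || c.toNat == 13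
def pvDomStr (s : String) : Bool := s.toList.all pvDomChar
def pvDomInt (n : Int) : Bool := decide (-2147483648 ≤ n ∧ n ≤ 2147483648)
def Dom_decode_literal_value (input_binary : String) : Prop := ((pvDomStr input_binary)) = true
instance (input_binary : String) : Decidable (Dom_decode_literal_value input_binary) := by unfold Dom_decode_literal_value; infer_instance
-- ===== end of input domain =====

-- B replaces A's iterative index-tracking accumulate-and-break loop by a
-- recursive-descent parser: consume one 5-bit group, recurse on the suffix.

-- ===== PORT A =====
-- while True: literal_value += part[1:]; index += 5; if part[0]=='0': break; part = s[index:index+5]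
-- Slices s[a:b] with 0 ≤ a ≤ b are (drop a).take (b-a). part = [] is Python's
-- IndexError at part[0] (excluded by Pre_); fuel (length+1) is ample: index grows by 5 per step.
def pvLoopA (s : List Char) (acc : List Char) (index : Nat) (part : List Char) : Nat → List Char
  | 0 => acc
  | fuel + 1 =>
    let acc := acc ++ part.drop 1
    let index := index + 5
    match part with
    | [] => acc  -- Python raises IndexError here (outside Pre_)
    | c :: _ =>
      if c = '0' then acc
      else pvLoopA s acc index ((s.drop index).take 5) fuel

def decode_literal_value (input_binary : String) : String :=
  let l := input_binary.toList
  String.ofList (pvLoopA l [] 0 (l.take 5) (l.length + 1))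

-- ===== PORT B =====
-- part = s[:5]; if part[0]=='0': return part[1:]; return part[1:] + decode_literal_value(s[5:])
def pvGoB (l : List Char) : List Char :=
  match h : l.take 5 with
  | [] => []  -- part[0] is Python's IndexError here (outside Pre_)
  | c :: rest =>  -- part[0] = c, part[1:] = rest
    if c = '0' then rest
    else rest ++ pvGoB (l.drop 5)
termination_by l.length
decreasing_by
  cases l with
  | nil => simp at h
  | cons x xs => simp

def decode_literal_value_alt (input_binary : String) : String :=
  String.ofList (pvGoB input_binary.toList)

-- ===== PRECONDITION & SPEC =====
-- A raises IndexError iff every scanned flag position 5*k runs off the end before a zero flag;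
-- Pre_ admits exactly the inputs where some flag position holds the zero character.
def Pre_decode_literal_value (input_binary : String) : Prop :=
  ∃ k < input_binary.toList.length, input_binary.toList.getD (5 * k) 'x' = '0'
instance (input_binary : String) : Decidable (Pre_decode_literal_value input_binary) := by
  unfold Pre_decode_literal_value; infer_instance

def pvWitness_decode_literal_value : String := "11010101100100"

def Spec_decode_literal_value (input_binary : String) (out : String) : Prop := out = decode_literal_value_alt input_binary
instance (input_binary : String) (out : String) : Decidable (Spec_decode_literal_value input_binary out) := by unfold Spec_decode_literal_value; infer_instance

-- ===== CLAIM =====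
def Claim_equal_decode_literal_value : Prop := ∀ (input_binary : String), Dom_decode_literal_value input_binary → Pre_decode_literal_value input_binary → Spec_decode_literal_value input_binary (decode_literal_value input_binary)

-- ===== LEMMAS AND PROOFS =====

theorem pvGoB_cons (c : Char) (rest : List Char) :
    pvGoB (c :: rest) =
      if c = '0' then rest.take 4 else rest.take 4 ++ pvGoB (rest.drop 4) := by
  rw [pvGoB.eq_def]
  simp [List.take_succ_cons, List.drop_succ_cons]

theorem pvGetD_drop (l : List Char) (n m : Nat) (d : Char) :
    (l.drop n).getD m d = l.getD (n + m) d := by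
  simp [List.getD, List.getElem?_drop]

theorem pvGetD_zero_ne_default {l : List Char} {i : Nat} (h : l.getD i 'x' = '0') :
    i < l.length := by
  by_contra hlt
  rw [List.getD_eq_getElem?_getD, List.getElem?_eq_none (by omega)] at h
  simp at h

theorem pvDrop_drop_eq (s : List Char) (a b c : Nat) (h : a + b = c) :
    (s.drop a).drop b = s.drop c := by
  rw [List.drop_drop, h]

theorem pvLoopA_eq (fuel : Nat) : ∀ (s : List Char) (index : Nat) (acc : List Char),
    (∃ k < fuel, (s.drop index).getD (5 * k) 'x' = '0') →
    pvLoopA s acc index ((s.drop index).take 5) fuel = acc ++ pvGoB (s.drop index) := by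
  induction fuel with
  | zero =>
    intro s index acc h
    obtain ⟨k, hk, _⟩ := h
    omega
  | succ fuel ih =>
    intro s index acc h
    obtain ⟨k, hk, hk0⟩ := h
    have hlen : 5 * k < (s.drop index).length := pvGetD_zero_ne_default hk0
    obtain ⟨c, rest, hl⟩ : ∃ c rest, s.drop index = c :: rest := by
      cases h : s.drop index with
      | nil => rw [h] at hlen; simp at hlen
      | cons c rest => exact ⟨c, rest, rfl⟩
    rw [hl]
    by_cases hc : c = '0'
    · subst hc
      simp [pvLoopA, pvGoB_cons]
    · have hk' : k ≠ 0 := by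
        intro h0; apply hc
        rw [hl] at hk0; simpa [h0, List.getD] using hk0
      obtain ⟨k', rfl⟩ : ∃ k', k = k' + 1 := ⟨k - 1, by omega⟩
      have hdrop5 : s.drop (index + 5) = rest.drop 4 := by
        rw [← pvDrop_drop_eq s index 5 (index + 5) rfl, hl]
        simp
      have hcond : ∃ j < fuel, (s.drop (index + 5)).getD (5 * j) 'x' = '0' := by
        refine ⟨k', by omega, ?_⟩
        have heq : (s.drop (index + 5)).getD (5 * k') 'x'
            = (s.drop index).getD (5 * (k' + 1)) 'x' := by
          rw [← pvDrop_drop_eq s index 5 (index + 5) rfl, pvGetD_drop]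
          congr 1; omega
        rw [heq]; exact hk0
      have step : pvLoopA s acc index ((c :: rest).take 5) (fuel + 1)
          = pvLoopA s (acc ++ rest.take 4) (index + 5) ((s.drop (index + 5)).take 5) fuel := by
        simp [pvLoopA, hc, List.take_succ_cons]
      rw [step, ih s (index + 5) (acc ++ rest.take 4) hcond, hdrop5]
      simp [pvGoB_cons, hc]

-- ===== VERDICT =====
theorem decode_literal_value_spec : Claim_equal_decode_literal_value := by
  intro s _ hpre
  unfold Spec_decode_literal_value decode_literal_value decode_literal_value_alt
  obtain ⟨k, hk, hk0⟩ := hpre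
  have := pvLoopA_eq (s.toList.length + 1) s.toList 0 [] ⟨k, by omega, by simpa using hk0⟩
  rw [show String.ofList (pvGoB s.toList) = String.ofList ([] ++ pvGoB (s.toList.drop 0)) by simp]
  exact congrArg String.ofList (by simpa using this)
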